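-- pv_equiv track=rewrite | github.com/xtclang/language-support | grammars/tmconvert.py | parse_ebnf
-- ===== SOURCE A (Python) =====
-- def parse_ebnf(ebnf):
--     rules = {}
--     current_rule = None
--     for line in ebnf.splitlines():
--         line = line.strip()
--         if not line or line.startswith('#'):
--             continue
--         if '=' in line:
--             lhs, rhs = line.split('=', 1)
--             lhs = lhs.strip()
--             rhs = rhs.strip().strip(';')
--             rules[lhs] = rhs
--             current_rule = lhs
--         elif current_rule and line.endswith(';'):
--             rules[current_rule] += ' ' + line.strip().strip(';')
--         elif current_rule:
--             rules[current_rule] += ' ' + line.strip()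
--     return rules
-- ===== SOURCE B (Python) =====
-- def parse_ebnf(ebnf):
--     kept = [ln for ln in (raw.strip() for raw in ebnf.splitlines())
--             if ln and not ln.startswith('#')]
--     blocks = []
--     for ln in kept:
--         if '=' in ln:
--             blocks.append([ln])
--         elif blocks:
--             blocks[-1].append(ln)
--     rules = {}
--     for head, *conts in blocks:
--         lhs, rhs = head.split('=', 1)
--         text = rhs.strip().strip(';')
--         for ln in conts:
--             text += ' ' + (ln.strip(';') if ln.endswith(';') else ln)
--         rules[lhs.strip()] = text
--     return rules
-- ===== Notes on version B (the rewrite author's own statement) =====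
-- stated objective: alternative
-- what changed: B replaces A's single stateful line loop (dict plus current_rule mutated per line) by a three-stage pipeline: normalize and filter the lines, partition them into blocks opened at each '='-line, then build each rule's full text per block and insert it once.
-- intended difference: On inputs where a definition line whose name (the text before its first '=') strips to empty is followed by continuation lines, A silently drops those lines (the empty rule name is falsy in its `elif current_rule` test) and keeps only the head's right-hand side, while B appends them to the empty-named rule's definition, the intended continuation behaviour. — e.g. on parse_ebnf("=a\nb"): A returns [("", "a")], B returns [("", "a b")]
import Mathlib
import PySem

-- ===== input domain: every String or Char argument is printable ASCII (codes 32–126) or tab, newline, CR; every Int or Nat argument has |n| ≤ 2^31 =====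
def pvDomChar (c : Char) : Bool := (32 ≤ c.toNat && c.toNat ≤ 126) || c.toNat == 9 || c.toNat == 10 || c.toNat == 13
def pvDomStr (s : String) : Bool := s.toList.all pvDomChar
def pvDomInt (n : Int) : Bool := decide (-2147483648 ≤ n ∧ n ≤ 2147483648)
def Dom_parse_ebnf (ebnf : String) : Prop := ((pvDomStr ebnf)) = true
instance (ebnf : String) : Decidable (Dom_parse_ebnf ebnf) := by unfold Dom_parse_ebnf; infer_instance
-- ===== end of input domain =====

-- B parses by partitioning the normalized lines into blocks (one per '='-line) and building each
-- rule's text per block (objective: alternative decomposition, same cost); on rules whose name is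
-- empty A drops continuation lines (falsy '' current_rule) while B keeps them — see D_parse_ebnf.


-- ===== PORT A =====
-- body of A's loop after `line = line.strip()` and the blank/comment test
def pvCoreA (st : PySem.Dict String String × Option String) (line : String) :
    PySem.Dict String String × Option String :=
  if PySem.Str.isIn "=" line then
    match PySem.Str.splitMax? line "=" 1 with
    | some [lhs0, rhs0] =>
      let lhs := PySem.Str.strip lhs0
      let rhs := PySem.Str.stripChars (PySem.Str.strip rhs0) ";"
      (st.1.insert lhs rhs, some lhs)
    | _ => st          -- unreachable: '=' in line gives exactly two parts
  else
    match st.2 with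
    | some cur =>
      if (cur != "") && PySem.Str.endswith line ";" then
        (st.1.modify cur "" (fun v => v ++ " " ++ PySem.Str.stripChars (PySem.Str.strip line) ";"), st.2)
      else if cur != "" then
        (st.1.modify cur "" (fun v => v ++ " " ++ PySem.Str.strip line), st.2)
      else st
    | none => st

def pvStepA (st : PySem.Dict String String × Option String) (rawline : String) :
    PySem.Dict String String × Option String :=
  let line := PySem.Str.strip rawline
  if line == "" || PySem.Str.startswith line "#" then st else pvCoreA st line

def parse_ebnf (ebnf : String) : List (String × String) :=
  ((PySem.Str.splitlines ebnf).foldl pvStepA (PySem.Dict.empty, none)).1.items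

-- ===== PORT B =====
def pvStepBlk (blocks : List (List String)) (ln : String) : List (List String) :=
  if PySem.Str.isIn "=" ln then blocks ++ [[ln]]
  else
    match blocks.getLast? with
    | some last => blocks.dropLast ++ [last ++ [ln]]
    | none => blocks

def pvPiece (text ln : String) : String :=
  text ++ " " ++ (if PySem.Str.endswith ln ";" then PySem.Str.stripChars ln ";" else ln)

def pvInsBlk (rules : PySem.Dict String String) (blk : List String) : PySem.Dict String String :=
  match blk with
  | [] => rules          -- unreachable: blocks are opened nonempty
  | head :: conts =>
    match PySem.Str.splitMax? head "=" 1 with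
    | some [lhs, rhs] =>
      rules.insert (PySem.Str.strip lhs)
        (conts.foldl pvPiece (PySem.Str.stripChars (PySem.Str.strip rhs) ";"))
    | _ => rules         -- unreachable: '=' in head gives exactly two parts

def parse_ebnf_alt (ebnf : String) : List (String × String) :=
  let kept := ((PySem.Str.splitlines ebnf).map PySem.Str.strip).filter
      (fun ln => !(ln == "") && !PySem.Str.startswith ln "#")
  (((kept.foldl pvStepBlk []).foldl pvInsBlk PySem.Dict.empty)).items

-- ===== PRECONDITION & SPEC =====
-- On inputs whose LAST rule-definition line with an all-whitespace name is followed by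
-- continuation lines (before the next definition line), A silently drops those lines (the empty
-- rule name is falsy in `elif current_rule`) and keeps only that rule's right-hand side, while B
-- appends them to the empty-named rule's definition, the intended continuation behaviour.
-- pvDScanC reads the normalized lines: cur = "the current block defines an empty name",
-- acc = "the latest empty-named block has seen a continuation line"; pvD1 = "all-whitespace name"
def pvD1 (s : List Char) : Bool :=
  (s.takeWhile (fun c => c ≠ '=')).all PySem.Chars.isspace

def pvDScanC : Bool → Bool → List (List Char) → Bool
  | _, acc, [] => acc
  | cur, acc, s :: r =>
    if s.contains '=' then pvDScanC (pvD1 s) (!pvD1 s && acc) r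
    else pvDScanC cur (cur || acc) r

def D_parse_ebnf (ebnf : String) : Prop :=
  pvDScanC false false (((PySem.Chars.splitlines ebnf.toList).map PySem.Chars.strip).filter
    (fun s => s.head?.any (fun c => c ≠ '#'))) = true
instance (ebnf : String) : Decidable (D_parse_ebnf ebnf) := by unfold D_parse_ebnf; infer_instance

def Spec_parse_ebnf (ebnf : String) (out : List (String × String)) : Prop :=
  ¬ D_parse_ebnf ebnf → out = parse_ebnf_alt ebnf
instance (ebnf : String) (out : List (String × String)) : Decidable (Spec_parse_ebnf ebnf out) := by
  unfold Spec_parse_ebnf; infer_instance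

def pvDiffWitness_parse_ebnf : String := "=a\nb"
def pvDiffWitnessOut_parse_ebnf : (List (String × String)) × (List (String × String)) :=
  ([("", "a")], [("", "a b")])

-- ===== CLAIM (what is proved, stated in full; the proofs are below) =====
def Claim_unchanged_parse_ebnf : Prop :=
  ∀ (ebnf : String), Dom_parse_ebnf ebnf → Spec_parse_ebnf ebnf (parse_ebnf ebnf)
def Claim_changed_parse_ebnf : Prop :=
  Dom_parse_ebnf (pvDiffWitness_parse_ebnf) ∧ D_parse_ebnf (pvDiffWitness_parse_ebnf) ∧
    parse_ebnf (pvDiffWitness_parse_ebnf) = pvDiffWitnessOut_parse_ebnf.1 ∧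
    parse_ebnf_alt (pvDiffWitness_parse_ebnf) = pvDiffWitnessOut_parse_ebnf.2 ∧
    pvDiffWitnessOut_parse_ebnf.1 ≠ pvDiffWitnessOut_parse_ebnf.2
def Claim_exact_parse_ebnf : Prop :=
  ∀ (ebnf : String), Dom_parse_ebnf ebnf → D_parse_ebnf ebnf →
    parse_ebnf ebnf ≠ parse_ebnf_alt ebnf

-- ===== LEMMAS AND PROOFS =====

-- proof-internal scan over the NORMALIZED kept lines (bridged to pvDScanC below)
def pvEmptyName (ln : String) : Bool :=
  PySem.Str.strip (String.ofList (ln.toList.takeWhile (fun c => c ≠ '='))) == ""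

def pvScanK : Bool → Bool → List String → Bool
  | _, acc, [] => acc
  | cur, acc, ln :: rest =>
    if PySem.Str.isIn "=" ln then
      pvScanK (pvEmptyName ln) (if pvEmptyName ln then false else acc) rest
    else pvScanK cur (if cur then true else acc) rest

-- the relation between A's and B's dictionaries: equal, or differing exactly in the value
-- stored under the empty rule name
def pvRel : Bool → PySem.Dict String String → PySem.Dict String String → Prop
  | false, dA, dB => dA = dB
  | true, dA, dB => dA.contains "" = true ∧
      ∃ w, dB = dA.insert "" w ∧ w ≠ dA.getD "" ""

theorem dw_idem {α} (p : α → Bool) (l : List α) :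
    (l.dropWhile p).dropWhile p = l.dropWhile p := by
  induction l with
  | nil => simp
  | cons a t ih => by_cases h : p a <;> simp [List.dropWhile_cons, h, ih]
theorem dw_prefix {α} (p : α → Bool) {l l' : List α} (h : l.dropWhile p = l)
    (hp : l' <+: l) : l'.dropWhile p = l' := by
  cases l' with
  | nil => simp
  | cons a t =>
    cases l with
    | nil => simp at hp
    | cons b u =>
      have hab : a = b := by
        obtain ⟨r, hr⟩ := hp
        simpa using (congrArg (·.head?) hr.symm).symm
      subst hab
      have hpa : p a = false := by
        by_cases hb : p a
        · exfalso
          rw [List.dropWhile_cons, if_pos hb] at h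
          have h2 := congrArg List.length h
          have h3 := List.length_dropWhile_le p u
          simp at h2
          omega
        · simpa using hb
      simp [hpa]
theorem strip_idem_chars (s : List Char) :
    PySem.Chars.strip (PySem.Chars.strip s) = PySem.Chars.strip s := by
  unfold PySem.Chars.strip PySem.Chars.rstrip PySem.Chars.lstrip
  set p := PySem.Chars.isspace
  set y := s.dropWhile p with hy
  have h1 : y.dropWhile p = y := dw_idem p s
  have hpre : ((y.reverse.dropWhile p).reverse) <+: y := by
    have hs : y.reverse.dropWhile p <:+ y.reverse := List.dropWhile_suffix p
    have := (List.reverse_prefix (l₁ := (y.reverse.dropWhile p).reverse) (l₂ := y))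
    rw [← y.reverse_reverse]
    exact List.reverse_prefix.mpr (by simpa using hs)
  rw [dw_prefix p h1 hpre]
  simp [dw_idem]
theorem pv_strip_idem (s : String) : PySem.Str.strip (PySem.Str.strip s) = PySem.Str.strip s := by
  have h : (PySem.Str.strip (PySem.Str.strip s)).toList = (PySem.Str.strip s).toList := by
    simp [PySem.Str.toList_strip, strip_idem_chars]
  exact String.toList_inj.mp h

-- A's fold over raw lines is the fold of its core over the normalized kept lines
theorem pv_foldA_filter (ls : List String) (st : PySem.Dict String String × Option String) :
    ls.foldl pvStepA st =
      ((ls.map PySem.Str.strip).filter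
        (fun ln => !(ln == "") && !PySem.Str.startswith ln "#")).foldl pvCoreA st := by
  induction ls generalizing st with
  | nil => rfl
  | cons a t ih =>
    simp only [List.foldl_cons, List.map_cons, List.filter_cons, ← Bool.not_or]
    by_cases h : (PySem.Str.strip a == "" || PySem.Str.startswith (PySem.Str.strip a) "#") = true
    · rw [h]
      have hs : pvStepA st a = st := by simp only [pvStepA]; rw [if_pos h]
      simp [hs, ih]
    · have hb : (PySem.Str.strip a == "" || PySem.Str.startswith (PySem.Str.strip a) "#") = false :=
        by simpa using h
      rw [hb]
      have hs : pvStepA st a = pvCoreA st (PySem.Str.strip a) := by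
        simp only [pvStepA]; rw [if_neg (by rw [hb]; exact Bool.false_ne_true)]
      simp [hs, ih]

-- characterization of `line.split('=', 1)` when '=' occurs in line
theorem pv_go_m0 (sep : List Char) (fuel : Nat) (l cur : List Char) (acc : List (List Char)) :
    PySem.Chars.splitOnMax.go sep fuel 0 l cur acc = ((cur.reverse ++ l) :: acc).reverse := by
  cases fuel with
  | zero => simp [PySem.Chars.splitOnMax.go]
  | succ f => cases l with
    | nil => simp [PySem.Chars.splitOnMax.go]
    | cons c rest => simp [PySem.Chars.splitOnMax.go]

theorem pv_go_one (l : List Char) : ∀ (fuel : Nat) (cur : List Char) (acc : List (List Char)),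
    l.length < fuel → '=' ∈ l →
    PySem.Chars.splitOnMax.go ['='] fuel 1 l cur acc =
      acc.reverse ++ [cur.reverse ++ l.takeWhile (fun c => c ≠ '='),
        (l.dropWhile (fun c => c ≠ '=')).tail] := by
  induction l with
  | nil => intro fuel cur acc hf hm; simp at hm
  | cons c rest ih =>
    intro fuel cur acc hf hm
    cases fuel with
    | zero => omega
    | succ f =>
      by_cases hc : c = '='
      · subst hc
        simp only [PySem.Chars.splitOnMax.go]
        have hpre : ['='].isPrefixOf ('=' :: rest) = true := by simp [List.isPrefixOf]
        simp only [hpre, if_true]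
        rw [pv_go_m0]
        simp [List.takeWhile_cons, List.dropWhile_cons]
      · have hm' : '=' ∈ rest := by
          rcases hm with _ | h
          · exact absurd rfl hc
          · assumption
        simp only [PySem.Chars.splitOnMax.go]
        have hpre : ['='].isPrefixOf (c :: rest) = false := by
          simp [List.isPrefixOf]
          exact fun h => absurd h.symm hc
        simp only [hpre, Bool.false_eq_true, if_false]
        rw [ih f (c :: cur) acc (by simpa using Nat.lt_of_succ_lt_succ hf) hm']
        simp [List.takeWhile_cons, hc]

theorem pv_isIn_eq_mem (l : String) (h : PySem.Str.isIn "=" l = true) : '=' ∈ l.toList := by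
  have h2 := (PySem.Chars.isIn_iff_infix (sub := "=".toList) (s := l.toList)).mp (by simpa using h)
  exact h2.mem (by simp)

theorem pv_splitMax_one (l : String) (h : PySem.Str.isIn "=" l = true) :
    PySem.Str.splitMax? l "=" 1 =
      some [String.ofList (l.toList.takeWhile (fun c => c ≠ '=')),
            String.ofList ((l.toList.dropWhile (fun c => c ≠ '=')).tail)] := by
  have hm := pv_isIn_eq_mem l h
  unfold PySem.Str.splitMax? PySem.Chars.splitMax? PySem.Chars.splitOnMax
  rw [show "=".toList = ['='] from rfl]
  rw [if_neg (by simp), if_neg (by norm_num)]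
  rw [show (1:Int).toNat = 1 from rfl]
  rw [pv_go_one l.toList (l.toList.length + 1) [] [] (by omega) hm]
  simp

-- the fused per-block specification both ports compute
def pvBlocksGo : List String → PySem.Dict String String → PySem.Dict String String
  | [], d => d
  | h :: t, d =>
    pvBlocksGo (t.dropWhile (fun l => !PySem.Str.isIn "=" l))
      (pvInsBlk d (h :: t.takeWhile (fun l => !PySem.Str.isIn "=" l)))
termination_by l => l.length
decreasing_by
  simpa using Nat.lt_succ_of_le (List.length_dropWhile_le _ _)

theorem pv_modify_insert (d : PySem.Dict String String) (c t : String) (f : String → String) :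
    (d.insert c t).modify c "" f = d.insert c (f t) := by
  unfold PySem.Dict.modify
  rw [PySem.Dict.getD_insert_self, PySem.Dict.insert_insert_self]

-- A's continuation lines fold into the current rule's text
theorem pv_contA (cont : List String) :
    ∀ (rest : List String) (d : PySem.Dict String String) (t c : String), c ≠ "" →
      (∀ l ∈ cont, PySem.Str.isIn "=" l = false ∧ PySem.Str.strip l = l) →
      (cont ++ rest).foldl pvCoreA (d.insert c t, some c) =
        rest.foldl pvCoreA (d.insert c (cont.foldl pvPiece t), some c) := by
  induction cont with
  | nil => intro rest d t c _ _; rfl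
  | cons l ls ih =>
    intro rest d t c hc hall
    obtain ⟨hne, hst⟩ := hall l (by simp)
    have hcb : (c != "") = true := by simpa using hc
    have hstep : pvCoreA (d.insert c t, some c) l = (d.insert c (pvPiece t l), some c) := by
      unfold pvCoreA
      rw [if_neg (by rw [hne]; exact Bool.false_ne_true)]
      dsimp only
      by_cases he : PySem.Str.endswith l ";" = true
      · rw [if_pos (by rw [hcb, he]; rfl)]
        simp only [pv_modify_insert]
        rw [hst]
        unfold pvPiece
        rw [if_pos he]
      · have he' : PySem.Str.endswith l ";" = false := by simpa using he
        rw [if_neg (by rw [hcb, he']; simp), if_pos (by rw [hcb])]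
        simp only [pv_modify_insert]
        rw [hst]
        unfold pvPiece
        rw [if_neg (by rw [he']; exact Bool.false_ne_true)]
    simp only [List.cons_append, List.foldl_cons, hstep]
    exact ih rest d (pvPiece t l) c hc (fun x hx => hall x (by simp [hx]))

theorem pv_dropWhile_headI (p : String → Bool) (l : List String) :
    l.dropWhile p = [] ∨ p ((l.dropWhile p).headI) = false := by
  induction l with
  | nil => simp
  | cons a t ih =>
    by_cases h : p a
    · rw [List.dropWhile_cons, if_pos h]
      exact ih
    · have h' : p a = false := by simpa using h
      right
      rw [List.dropWhile_cons, if_neg (by rw [h']; exact Bool.false_ne_true)]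
      simpa using h'

def pvBlocks : List String → List (List String)
  | [] => []
  | h :: t =>
    (h :: t.takeWhile (fun l => !PySem.Str.isIn "=" l)) ::
      pvBlocks (t.dropWhile (fun l => !PySem.Str.isIn "=" l))
termination_by l => l.length
decreasing_by
  simpa using Nat.lt_succ_of_le (List.length_dropWhile_le _ _)

theorem pv_blkB (conts : List String) :
    ∀ (rest : List String) (bs : List (List String)) (blk : List String),
      (∀ l ∈ conts, PySem.Str.isIn "=" l = false) →
      (conts ++ rest).foldl pvStepBlk (bs ++ [blk]) =
        rest.foldl pvStepBlk (bs ++ [blk ++ conts]) := by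
  induction conts with
  | nil => simp
  | cons l ls ih =>
    intro rest bs blk hall
    have hl := hall l (by simp)
    have hstep : pvStepBlk (bs ++ [blk]) l = bs ++ [blk ++ [l]] := by
      unfold pvStepBlk
      rw [if_neg (by rw [hl]; exact Bool.false_ne_true), List.getLast?_concat]
      dsimp only
      rw [List.dropLast_concat]
    simp only [List.cons_append, List.foldl_cons, hstep]
    rw [ih rest bs (blk ++ [l]) (fun x hx => hall x (by simp [hx]))]
    simp

theorem pv_mainB (n : Nat) :
    ∀ (L : List String), L.length ≤ n →
      (L = [] ∨ PySem.Str.isIn "=" L.headI = true) →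
      ∀ bs, L.foldl pvStepBlk bs = bs ++ pvBlocks L := by
  induction n with
  | zero =>
    intro L hlen _ bs
    have hL : L = [] := List.length_eq_zero_iff.mp (Nat.le_zero.mp hlen)
    subst hL; rw [pvBlocks]; simp
  | succ n ih =>
    intro L hlen hhead bs
    cases L with
    | nil => rw [pvBlocks]; simp
    | cons h t =>
      have hEq : PySem.Str.isIn "=" h = true := by
        rcases hhead with h1 | h1
        · exact absurd h1 (by simp)
        · simpa using h1
      set q : String → Bool := fun l => !PySem.Str.isIn "=" l with hq
      have hstep : pvStepBlk bs h = bs ++ [[h]] := by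
        unfold pvStepBlk
        rw [if_pos hEq]
      have hT : t = t.takeWhile q ++ t.dropWhile q :=
        (List.takeWhile_append_dropWhile (p := q) (l := t)).symm
      have hconts : ∀ l ∈ t.takeWhile q, PySem.Str.isIn "=" l = false := by
        intro l hl
        simpa [hq] using List.mem_takeWhile_imp hl
      have hrest_head : t.dropWhile q = [] ∨ PySem.Str.isIn "=" ((t.dropWhile q).headI) = true := by
        rcases pv_dropWhile_headI q t with h1 | h1
        · exact Or.inl h1
        · right; simpa [hq] using h1
      have hrest_len : (t.dropWhile q).length ≤ n := by
        have := List.length_dropWhile_le q t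
        simp at hlen; omega
      simp only [List.foldl_cons, hstep]
      conv_lhs => rw [hT]
      rw [pv_blkB (t.takeWhile q) (t.dropWhile q) bs [h] hconts]
      rw [ih _ hrest_len hrest_head]
      rw [show pvBlocks (h :: t) = (h :: t.takeWhile q) :: pvBlocks (t.dropWhile q) from by
        rw [pvBlocks]]
      simp

theorem pv_insBlocks (n : Nat) :
    ∀ (L : List String), L.length ≤ n →
      ∀ d, (pvBlocks L).foldl pvInsBlk d = pvBlocksGo L d := by
  induction n with
  | zero =>
    intro L hlen d
    have hL : L = [] := List.length_eq_zero_iff.mp (Nat.le_zero.mp hlen)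
    subst hL; rw [pvBlocks, pvBlocksGo]; rfl
  | succ n ih =>
    intro L hlen d
    cases L with
    | nil => rw [pvBlocks, pvBlocksGo]; rfl
    | cons h t =>
      set q : String → Bool := fun l => !PySem.Str.isIn "=" l with hq
      have hrest_len : (t.dropWhile q).length ≤ n := by
        have := List.length_dropWhile_le q t
        simp at hlen; omega
      rw [show pvBlocks (h :: t) = (h :: t.takeWhile q) :: pvBlocks (t.dropWhile q) from by
        rw [pvBlocks]]
      rw [show pvBlocksGo (h :: t) d =
          pvBlocksGo (t.dropWhile q) (pvInsBlk d (h :: t.takeWhile q)) from by rw [pvBlocksGo]]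
      rw [List.foldl_cons]
      exact ih _ hrest_len _

theorem pv_preA (pre : List String) :
    ∀ d, (∀ l ∈ pre, PySem.Str.isIn "=" l = false) →
      pre.foldl pvCoreA (d, none) = (d, none) := by
  induction pre with
  | nil => intro d _; rfl
  | cons l ls ih =>
    intro d hall
    have hl := hall l (by simp)
    have hstep : pvCoreA (d, none) l = (d, none) := by
      unfold pvCoreA
      rw [if_neg (by rw [hl]; exact Bool.false_ne_true)]
    simp only [List.foldl_cons, hstep]
    exact ih d (fun x hx => hall x (by simp [hx]))

theorem pv_preB (pre : List String) :
    (∀ l ∈ pre, PySem.Str.isIn "=" l = false) →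
      pre.foldl pvStepBlk [] = [] := by
  induction pre with
  | nil => intro _; rfl
  | cons l ls ih =>
    intro hall
    have hl := hall l (by simp)
    have hstep : pvStepBlk [] l = [] := by
      unfold pvStepBlk
      rw [if_neg (by rw [hl]; exact Bool.false_ne_true)]
      rfl
    simp only [List.foldl_cons, hstep]
    exact ih (fun x hx => hall x (by simp [hx]))

theorem pv_strip_eq_nil_iff (x : List Char) :
    PySem.Chars.strip x = [] ↔ x.all PySem.Chars.isspace = true := by
  unfold PySem.Chars.strip PySem.Chars.rstrip PySem.Chars.lstrip
  constructor
  · intro h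
    have h1 : ∀ c ∈ (x.dropWhile PySem.Chars.isspace).reverse, PySem.Chars.isspace c := by
      have := congrArg List.reverse h
      simp at this
      exact List.dropWhile_eq_nil_iff.mp (by simpa using this)
    have h2 : ∀ c ∈ x.dropWhile PySem.Chars.isspace, PySem.Chars.isspace c := by
      intro c hc; exact h1 c (by simpa using hc)
    rw [List.all_eq_true]
    intro c hc
    rcases (List.mem_append.mp (by
      rw [List.takeWhile_append_dropWhile (p := PySem.Chars.isspace)]; exact hc :
        c ∈ x.takeWhile PySem.Chars.isspace ++ x.dropWhile PySem.Chars.isspace)) with h3 | h3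
    · exact List.mem_takeWhile_imp h3
    · exact h2 c h3
  · intro h
    have h1 : x.dropWhile PySem.Chars.isspace = [] :=
      List.dropWhile_eq_nil_iff.mpr (fun c hc => by
        exact List.all_eq_true.mp h c hc)
    rw [h1]
    rfl

theorem pv_startswith_hash (s : List Char) :
    PySem.Chars.startswith s ['#'] = (s.head? == some '#') := by
  cases s with
  | nil => rfl
  | cons c t =>
    simp only [PySem.Chars.startswith, List.isPrefixOf, List.head?]
    cases hc : (('#' : Char) == c) with
    | false =>
      have : (some c == some '#') = false := by
        simp at hc ⊢
        exact fun h => hc h.symm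
      rw [this]; simp
    | true =>
      have : (some c == some '#') = true := by
        simp at hc ⊢
        exact hc.symm
      rw [this]; simp [List.isPrefixOf]

theorem pv_isIn_singleton (c : Char) (s : List Char) :
    PySem.Chars.isIn [c] s = s.contains c := by
  cases hc : s.contains c with
  | true =>
    have hm : c ∈ s := by simpa using hc
    obtain ⟨l1, l2, rfl⟩ := List.append_of_mem hm
    exact (PySem.Chars.isIn_iff_infix _ _).mpr ⟨l1, l2, by simp⟩
  | false =>
    cases hi : PySem.Chars.isIn [c] s with
    | false => rfl
    | true =>
      have hm : c ∈ s := ((PySem.Chars.isIn_iff_infix _ _).mp hi).mem (by simp)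
      simp [hm] at hc

theorem pv_toList_strip_ofList (raw : List Char) :
    (PySem.Str.strip (String.ofList raw)).toList = PySem.Chars.strip raw := by
  simp

theorem pv_str_eq_iff_toList (s : String) (l : List Char) (h : s.toList = l) :
    (s == "") = l.isEmpty := by
  cases hl : l.isEmpty with
  | true =>
    have : s = "" := String.toList_inj.mp (by rw [h]; simpa using hl)
    simp [this]
  | false =>
    have : ¬ s = "" := by
      intro he
      rw [he] at h
      rw [← h] at hl
      simp at hl
    simpa using this

theorem pv_scanK_conts_false (conts : List String) :
    ∀ (acc : Bool) (rest : List String), (∀ l ∈ conts, PySem.Str.isIn "=" l = false) →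
      pvScanK false acc (conts ++ rest) = pvScanK false acc rest := by
  induction conts with
  | nil => intro acc rest _; rfl
  | cons l ls ih =>
    intro acc rest hall
    have hl := hall l (by simp)
    rw [List.cons_append, pvScanK, if_neg (by rw [hl]; exact Bool.false_ne_true),
      if_neg (by exact Bool.false_ne_true)]
    exact ih acc rest (fun x hx => hall x (by simp [hx]))

theorem pv_scanK_conts_true (conts : List String) :
    ∀ (acc : Bool) (rest : List String), (∀ l ∈ conts, PySem.Str.isIn "=" l = false) →
      pvScanK true acc (conts ++ rest) = pvScanK true (if conts.isEmpty then acc else true) rest := by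
  induction conts with
  | nil => intro acc rest _; rfl
  | cons l ls ih =>
    intro acc rest hall
    have hl := hall l (by simp)
    rw [List.cons_append, pvScanK, if_neg (by rw [hl]; exact Bool.false_ne_true),
      if_pos (by trivial)]
    rw [ih true rest (fun x hx => hall x (by simp [hx]))]
    cases ls <;> rfl

theorem pv_scanK_head (rest : List String)
    (h : rest = [] ∨ PySem.Str.isIn "=" rest.headI = true) (cur acc : Bool) :
    pvScanK cur acc rest = pvScanK false acc rest := by
  cases rest with
  | nil => rfl
  | cons r rs =>
    have hr : PySem.Str.isIn "=" r = true := by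
      rcases h with h1 | h1
      · exact absurd h1 (by simp)
      · simpa using h1
    rw [pvScanK, pvScanK, if_pos hr, if_pos hr]

theorem pv_beq_empty_false {k : String} (hk : k ≠ "") :
    ((k == "") = false) ∧ ((("" : String) == k) = false) := by
  constructor
  · exact beq_eq_false_iff_ne.mpr hk
  · exact beq_eq_false_iff_ne.mpr (fun h => hk h.symm)

theorem pv_insert_comm (d : PySem.Dict String String) (h : d.contains "" = true)
    (k : String) (hk : k ≠ "") (w v : String) :
    (d.insert "" w).insert k v = (d.insert k v).insert "" w := by
  obtain ⟨hk1, hk2⟩ := pv_beq_empty_false hk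
  have c2 : (d.insert k v).contains "" = true := by
    rw [PySem.Dict.contains_insert, hk2, h]
    rfl
  by_cases hck : d.contains k = true
  · have c1 : (d.insert "" w).contains k = true := by
      rw [PySem.Dict.contains_insert, hk1, hck]
      rfl
    apply PySem.Dict.ext
    rw [PySem.Dict.items_insert_of_contains _ _ c1, PySem.Dict.items_insert_of_contains _ _ h,
      PySem.Dict.items_insert_of_contains _ _ c2, PySem.Dict.items_insert_of_contains _ _ hck,
      List.map_map, List.map_map]
    apply List.map_congr_left
    intro p _
    simp only [Function.comp_apply]
    by_cases hp : p.1 = ""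
    · have hpk : (p.1 == k) = false := by rw [hp]; exact hk2
      have hpe : (p.1 == "") = true := by rw [hp]; exact beq_self_eq_true ""
      rw [hpe, hpk]
      simp only [if_true, if_false, Bool.false_eq_true]
      rw [if_neg (by rw [hk2]; exact Bool.false_ne_true), if_pos (by trivial)]
    · have hpe : (p.1 == "") = false := beq_eq_false_iff_ne.mpr hp
      rw [hpe]
      simp only [Bool.false_eq_true, if_false]
      by_cases hpk : p.1 = k
      · have hpk' : (p.1 == k) = true := by rw [hpk]; exact beq_self_eq_true k
        rw [hpk', if_pos (by trivial), if_neg (by rw [hk1]; exact Bool.false_ne_true)]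
      · have hpk' : (p.1 == k) = false := beq_eq_false_iff_ne.mpr hpk
        rw [hpk']
        simp only [Bool.false_eq_true, if_false]
        rw [hpe]
        simp
  · have hck' : d.contains k = false := by simpa using hck
    have c1 : (d.insert "" w).contains k = false := by
      rw [PySem.Dict.contains_insert, hk1, hck']
      rfl
    apply PySem.Dict.ext
    rw [PySem.Dict.items_insert_of_not_contains _ _ c1, PySem.Dict.items_insert_of_contains _ _ h,
      PySem.Dict.items_insert_of_contains _ _ c2, PySem.Dict.items_insert_of_not_contains _ _ hck',
      List.map_append]
    simp [hk1]
    intro hke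
    exact absurd hke hk

theorem pv_rel_insert_ne (b : Bool) (dA dB : PySem.Dict String String)
    (h : pvRel b dA dB) (k : String) (hk : k ≠ "") (v : String) :
    pvRel b (dA.insert k v) (dB.insert k v) := by
  cases b with
  | false => rw [show dA = dB from h]; rfl
  | true =>
    obtain ⟨hc, w, rfl, hw⟩ := h
    obtain ⟨hk1, hk2⟩ := pv_beq_empty_false hk
    refine ⟨?_, w, ?_, ?_⟩
    · rw [PySem.Dict.contains_insert, hk2, hc]
      rfl
    · exact pv_insert_comm dA hc k hk w v
    · rw [PySem.Dict.getD_insert_of_ne _ _ _ (fun h => hk (Eq.symm h))]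
      exact hw

theorem pv_rel_heal (b : Bool) (dA dB : PySem.Dict String String)
    (h : pvRel b dA dB) (v : String) :
    pvRel false (dA.insert "" v) (dB.insert "" v) := by
  cases b with
  | false => rw [show dA = dB from h]; rfl
  | true =>
    obtain ⟨hc, w, rfl, hw⟩ := h
    show dA.insert "" v = (dA.insert "" w).insert "" v
    rw [PySem.Dict.insert_insert_self]

theorem pv_rel_diff (b : Bool) (dA dB : PySem.Dict String String)
    (h : pvRel b dA dB) (vA vB : String) (hne : vB ≠ vA) :
    pvRel true (dA.insert "" vA) (dB.insert "" vB) := by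
  have hB : dB.insert "" vB = (dA.insert "" vA).insert "" vB := by
    cases b with
    | false => rw [show dA = dB from h, PySem.Dict.insert_insert_self]
    | true =>
      obtain ⟨hc, w, rfl, hw⟩ := h
      rw [PySem.Dict.insert_insert_self, PySem.Dict.insert_insert_self]
  refine ⟨PySem.Dict.contains_insert_self _ _ _, vB, hB, ?_⟩
  rw [PySem.Dict.getD_insert_self]
  exact hne

theorem pv_rel_items_ne (dA dB : PySem.Dict String String) (h : pvRel true dA dB) :
    dA.items ≠ dB.items := by
  obtain ⟨hc, w, rfl, hw⟩ := h
  intro he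
  have hd : dA = dA.insert "" w := PySem.Dict.ext he
  have := congrArg (fun d => PySem.Dict.getD d "" "") hd
  simp only [PySem.Dict.getD_insert_self] at this
  exact hw this.symm

theorem pv_piece_len_mono (ls : List String) :
    ∀ t : String, t.length ≤ (ls.foldl pvPiece t).length := by
  induction ls with
  | nil => intro t; exact le_rfl
  | cons l ls ih =>
    intro t
    have h1 : t.length ≤ (pvPiece t l).length := by
      unfold pvPiece
      simp only [String.length_append]
      have h0 : (" " : String).length = 1 := rfl
      omega
    calc t.length ≤ (pvPiece t l).length := h1
      _ ≤ _ := ih (pvPiece t l)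

theorem pv_fold_piece_ne (ls : List String) (h : ls ≠ []) (t : String) :
    ls.foldl pvPiece t ≠ t := by
  cases ls with
  | nil => exact absurd rfl h
  | cons l ls =>
    intro he
    have h1 : (pvPiece t l).length ≤ ((l :: ls).foldl pvPiece t).length := by
      rw [List.foldl_cons]
      exact pv_piece_len_mono ls (pvPiece t l)
    have h2 : t.length < (pvPiece t l).length := by
      unfold pvPiece
      simp only [String.length_append]
      have h0 : (" " : String).length = 1 := rfl
      omega
    rw [he] at h1
    omega

theorem pv_skipA (cont : List String) :
    ∀ d, (∀ l ∈ cont, PySem.Str.isIn "=" l = false) →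
      cont.foldl pvCoreA (d, some "") = (d, some "") := by
  induction cont with
  | nil => intro d _; rfl
  | cons l ls ih =>
    intro d hall
    have hl := hall l (by simp)
    have hff : (("" : String) != "") = false := rfl
    have hstep : pvCoreA (d, some "") l = (d, some "") := by
      unfold pvCoreA
      rw [if_neg (by rw [hl]; exact Bool.false_ne_true)]
      dsimp only
      rw [if_neg (by rw [hff, Bool.false_and]; exact Bool.false_ne_true)]
      rw [if_neg (by rw [hff]; exact Bool.false_ne_true)]
    simp only [List.foldl_cons, hstep]
    exact ih d (fun x hx => hall x (by simp [hx]))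

theorem pv_mainAB (n : Nat) :
    ∀ (L : List String), L.length ≤ n →
      (∀ l ∈ L, PySem.Str.strip l = l) →
      (L = [] ∨ PySem.Str.isIn "=" L.headI = true) →
      ∀ (b : Bool) (dA dB : PySem.Dict String String) (cur : Option String),
        pvRel b dA dB →
        pvRel (pvScanK false b L) (L.foldl pvCoreA (dA, cur)).1 (pvBlocksGo L dB) := by
  induction n with
  | zero =>
    intro L hlen _ _ b dA dB cur hrel
    have hL : L = [] := List.length_eq_zero_iff.mp (Nat.le_zero.mp hlen)
    subst hL
    rw [show pvBlocksGo [] dB = dB from by rw [pvBlocksGo]]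
    exact hrel
  | succ n ih =>
    intro L hlen hstr hhead b dA dB cur hrel
    cases L with
    | nil =>
      rw [show pvBlocksGo [] dB = dB from by rw [pvBlocksGo]]
      exact hrel
    | cons h t =>
      have hEq : PySem.Str.isIn "=" h = true := by
        rcases hhead with h1 | h1
        · exact absurd h1 (by simp)
        · simpa using h1
      set q : String → Bool := fun l => !PySem.Str.isIn "=" l with hq
      have hsplit := pv_splitMax_one h hEq
      set lhs := String.ofList (h.toList.takeWhile (fun c => c ≠ '=')) with hlhs
      set rhs := String.ofList ((h.toList.dropWhile (fun c => c ≠ '=')).tail) with hrhs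
      set c := PySem.Str.strip lhs with hcdef
      set base := PySem.Str.stripChars (PySem.Str.strip rhs) ";" with hbase
      have hstep : pvCoreA (dA, cur) h = (dA.insert c base, some c) := by
        unfold pvCoreA
        rw [if_pos hEq, hsplit]
      have hT : t = t.takeWhile q ++ t.dropWhile q :=
        (List.takeWhile_append_dropWhile (p := q) (l := t)).symm
      have hconts : ∀ l ∈ t.takeWhile q, PySem.Str.isIn "=" l = false ∧ PySem.Str.strip l = l := by
        intro l hl
        have h1 := List.mem_takeWhile_imp hl
        have h2 : l ∈ t := (List.takeWhile_sublist (l := t) (p := q)).subset hl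
        refine ⟨by simpa [hq] using h1, hstr l (by simp [h2])⟩
      have hrest_head : t.dropWhile q = [] ∨ PySem.Str.isIn "=" ((t.dropWhile q).headI) = true := by
        rcases pv_dropWhile_headI q t with h1 | h1
        · exact Or.inl h1
        · right; simpa [hq] using h1
      have hrest_len : (t.dropWhile q).length ≤ n := by
        have := List.length_dropWhile_le q t
        simp at hlen; omega
      have hrest_str : ∀ l ∈ t.dropWhile q, PySem.Str.strip l = l := by
        intro l hl
        exact hstr l (by simp [(List.dropWhile_sublist (l := t) (p := q)).subset hl])
      have hname : pvEmptyName h = (c == "") := by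
        simp [pvEmptyName, hcdef, hlhs]
      have hgo : pvBlocksGo (h :: t) dB =
          pvBlocksGo (t.dropWhile q) (pvInsBlk dB (h :: t.takeWhile q)) := by
        rw [pvBlocksGo]
      have hins : pvInsBlk dB (h :: t.takeWhile q) =
          dB.insert c ((t.takeWhile q).foldl pvPiece base) := by
        simp only [pvInsBlk]
        rw [hsplit]
      have hscan1 : pvScanK false b (h :: t) =
          pvScanK (c == "") (if (c == "") = true then false else b) t := by
        rw [pvScanK, if_pos hEq, hname]
      by_cases hcne : c = ""
      · have hbc : (c == "") = true := by rw [hcne]; exact beq_self_eq_true ""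
        rw [hcne] at hstep hins
        cases hcnil : t.takeWhile q with
        | nil =>
          have hrest_eq : t.dropWhile q = t := by
            conv_rhs => rw [hT, hcnil]
            rfl
          have hhead_t : t = [] ∨ PySem.Str.isIn "=" t.headI = true := by
            rw [← hrest_eq]; exact hrest_head
          have hscan2 : pvScanK false b (h :: t) = pvScanK false false t := by
            rw [hscan1, hbc, if_pos (by trivial), pv_scanK_head t hhead_t]
          rw [hcnil, List.foldl_nil] at hins
          rw [hscan2, hgo, hcnil, hins, hrest_eq]
          simp only [List.foldl_cons, hstep]
          exact ih t (by simp at hlen; omega) (fun l hl => hstr l (by simp [hl])) hhead_t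
            false (dA.insert "" base) (dB.insert "" base) (some "")
            (pv_rel_heal b dA dB hrel base)
        | cons x xs =>
          have hcontsne : t.takeWhile q ≠ [] := by rw [hcnil]; simp
          have hne : (t.takeWhile q).foldl pvPiece base ≠ base :=
            pv_fold_piece_ne _ hcontsne base
          have hscan2 : pvScanK false b (h :: t) = pvScanK false true (t.dropWhile q) := by
            rw [hscan1, hbc, if_pos (by trivial)]
            conv_lhs => rw [hT]
            rw [pv_scanK_conts_true (t.takeWhile q) false _ (fun l hl => (hconts l hl).1),
              hcnil]
            rw [show ((x :: xs : List String).isEmpty) = false from rfl,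
              if_neg (by exact Bool.false_ne_true), pv_scanK_head _ hrest_head]
          rw [hscan2, hgo, hins]
          simp only [List.foldl_cons, hstep]
          conv_lhs => rw [hT]
          rw [List.foldl_append, pv_skipA (t.takeWhile q) _ (fun l hl => (hconts l hl).1)]
          exact ih _ hrest_len hrest_str hrest_head true (dA.insert "" base)
            (dB.insert "" ((t.takeWhile q).foldl pvPiece base)) (some "")
            (pv_rel_diff b dA dB hrel base _ hne)
      · have hbc : (c == "") = false := beq_eq_false_iff_ne.mpr hcne
        have hscan2 : pvScanK false b (h :: t) = pvScanK false b (t.dropWhile q) := by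
          rw [hscan1, hbc, if_neg (by exact Bool.false_ne_true)]
          conv_lhs => rw [hT]
          exact pv_scanK_conts_false (t.takeWhile q) b _ (fun l hl => (hconts l hl).1)
        rw [hscan2, hgo, hins]
        simp only [List.foldl_cons, hstep]
        conv_lhs => rw [hT]
        rw [pv_contA (t.takeWhile q) (t.dropWhile q) dA base c hcne hconts]
        exact ih _ hrest_len hrest_str hrest_head b
          (dA.insert c ((t.takeWhile q).foldl pvPiece base))
          (dB.insert c ((t.takeWhile q).foldl pvPiece base)) (some c)
          (pv_rel_insert_ne b dA dB hrel c hcne _)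

-- pvEmptyName, stated on the character list
theorem pv_emptyName_eq (ln : String) :
    pvEmptyName ln = pvD1 ln.toList := by
  unfold pvEmptyName pvD1
  have h1 := pv_str_eq_iff_toList
    (PySem.Str.strip (String.ofList (ln.toList.takeWhile (fun c => c ≠ '='))))
    (PySem.Chars.strip (ln.toList.takeWhile (fun c => c ≠ '=')))
    (pv_toList_strip_ofList _)
  rw [h1]
  cases h2 : (ln.toList.takeWhile (fun c => c ≠ '=')).all PySem.Chars.isspace with
  | true =>
    rw [(pv_strip_eq_nil_iff _).mpr h2]
    rfl
  | false =>
    cases h3 : (PySem.Chars.strip (ln.toList.takeWhile (fun c => c ≠ '='))).isEmpty with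
    | false => rfl
    | true =>
      have := (pv_strip_eq_nil_iff (ln.toList.takeWhile (fun c => c ≠ '='))).mp
        (by simpa using h3)
      rw [this] at h2
      exact absurd h2 (by simp)

-- the keep test, at the character level
theorem pv_keep_pred (sc : List Char) :
    (!sc.isEmpty && !(sc.head? == some '#')) = sc.head?.any (fun c => c ≠ '#') := by
  cases sc with
  | nil => rfl
  | cons c cs =>
    simp only [List.isEmpty_cons, List.head?_cons, Option.any_some, Bool.not_false,
      Bool.true_and]
    by_cases hc : c = '#'
    · subst hc; simp
    · have h2 : (some c == some '#') = false := by simpa using hc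
      rw [h2]
      simp [hc]

-- the normalized kept lines, at the character level and at the string level
theorem pv_kept_eq (L : List (List Char)) :
    ((L.map (fun l => PySem.Str.strip (String.ofList l))).filter
        (fun ln => !(ln == "") && !PySem.Str.startswith ln "#")).map String.toList =
      (L.map PySem.Chars.strip).filter (fun s => s.head?.any (fun c => c ≠ '#')) := by
  induction L with
  | nil => rfl
  | cons raw rest ih =>
    have hts : (PySem.Str.strip (String.ofList raw)).toList = PySem.Chars.strip raw :=
      pv_toList_strip_ofList raw
    have hE : (PySem.Str.strip (String.ofList raw) == "") = (PySem.Chars.strip raw).isEmpty :=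
      pv_str_eq_iff_toList _ _ hts
    have hH : PySem.Str.startswith (PySem.Str.strip (String.ofList raw)) "#" =
        ((PySem.Chars.strip raw).head? == some '#') := by
      show PySem.Chars.startswith (PySem.Str.strip (String.ofList raw)).toList "#".toList = _
      rw [hts, show "#".toList = ['#'] from rfl]
      exact pv_startswith_hash _
    have hp : (!(PySem.Str.strip (String.ofList raw) == "") &&
        !PySem.Str.startswith (PySem.Str.strip (String.ofList raw)) "#") =
        (PySem.Chars.strip raw).head?.any (fun c => c ≠ '#') := by
      rw [hE, hH]
      exact pv_keep_pred _
    simp only [List.map_cons, List.filter_cons, hp]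
    cases hk : (PySem.Chars.strip raw).head?.any (fun c => c ≠ '#') with
    | true =>
      rw [if_pos rfl, if_pos rfl, List.map_cons, hts, ih]
    | false =>
      rw [if_neg (by exact Bool.false_ne_true), if_neg (by exact Bool.false_ne_true)]
      exact ih

theorem pv_scan_eq (K : List String) :
    ∀ cur acc, pvScanK cur acc K = pvDScanC cur acc (K.map String.toList) := by
  induction K with
  | nil => intro cur acc; rfl
  | cons ln rest ih =>
    intro cur acc
    have hIn : PySem.Str.isIn "=" ln = ln.toList.contains '=' := by
      show PySem.Chars.isIn "=".toList ln.toList = _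
      rw [show "=".toList = ['='] from rfl]
      exact pv_isIn_singleton '=' ln.toList
    by_cases hin : ln.toList.contains '=' = true
    · have hS : pvScanK cur acc (ln :: rest) =
          pvScanK (pvEmptyName ln) (if pvEmptyName ln then false else acc) rest := by
        rw [pvScanK, if_pos (by rw [hIn, hin])]
      have hC : pvDScanC cur acc (ln.toList :: rest.map String.toList) =
          pvDScanC (pvD1 ln.toList) (!pvD1 ln.toList && acc) (rest.map String.toList) := by
        rw [pvDScanC, if_pos hin]
      have hacc : (if pvEmptyName ln = true then false else acc) =
          (!pvD1 ln.toList && acc) := by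
        rw [pv_emptyName_eq]
        cases h : pvD1 ln.toList <;> simp
      rw [List.map_cons, hS, hC, hacc, pv_emptyName_eq, ih]
    · have hin' : ln.toList.contains '=' = false := by simpa using hin
      have hS : pvScanK cur acc (ln :: rest) =
          pvScanK cur (if cur then true else acc) rest := by
        rw [pvScanK, if_neg (by rw [hIn, hin']; exact Bool.false_ne_true)]
      have hC : pvDScanC cur acc (ln.toList :: rest.map String.toList) =
          pvDScanC cur (cur || acc) (rest.map String.toList) := by
        rw [pvDScanC, if_neg (by rw [hin']; exact Bool.false_ne_true)]
      have hacc : (if cur = true then true else acc) = (cur || acc) := by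
        cases cur <;> simp
      rw [List.map_cons, hS, hC, hacc, ih]

theorem pv_top (e : String) :
    pvRel (pvDScanC false false (((PySem.Chars.splitlines e.toList).map PySem.Chars.strip).filter
        (fun s => s.head?.any (fun c => c ≠ '#'))))
      (((PySem.Str.splitlines e).foldl pvStepA (PySem.Dict.empty, none)).1)
      ((((((PySem.Str.splitlines e).map PySem.Str.strip).filter
          (fun ln => !(ln == "") && !PySem.Str.startswith ln "#")).foldl pvStepBlk []).foldl
        pvInsBlk PySem.Dict.empty)) := by
  set K := ((PySem.Str.splitlines e).map PySem.Str.strip).filter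
      (fun ln => !(ln == "") && !PySem.Str.startswith ln "#") with hK
  have hmap : ((PySem.Str.splitlines e).map PySem.Str.strip) =
      (PySem.Chars.splitlines e.toList).map (fun l => PySem.Str.strip (String.ofList l)) := by
    rw [show PySem.Str.splitlines e = (PySem.Chars.splitlines e.toList).map String.ofList from
      rfl, List.map_map]
    rfl
  have hbridge : pvDScanC false false
      (((PySem.Chars.splitlines e.toList).map PySem.Chars.strip).filter
        (fun s => s.head?.any (fun c => c ≠ '#'))) = pvScanK false false K := by
    rw [← pv_kept_eq, ← pv_scan_eq, hK, hmap]
  rw [hbridge]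
  set q : String → Bool := fun l => !PySem.Str.isIn "=" l with hq
  have hstr : ∀ l ∈ K, PySem.Str.strip l = l := by
    intro l hl
    rw [hK] at hl
    obtain ⟨hm, -⟩ := List.mem_filter.mp hl
    obtain ⟨x, -, rfl⟩ := List.mem_map.mp hm
    exact pv_strip_idem x
  have hKdec : K = K.takeWhile q ++ K.dropWhile q :=
    (List.takeWhile_append_dropWhile (p := q) (l := K)).symm
  have hpre : ∀ l ∈ K.takeWhile q, PySem.Str.isIn "=" l = false := by
    intro l hl
    simpa [hq] using List.mem_takeWhile_imp hl
  have hhead : K.dropWhile q = [] ∨ PySem.Str.isIn "=" ((K.dropWhile q).headI) = true := by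
    rcases pv_dropWhile_headI q K with h1 | h1
    · exact Or.inl h1
    · right; simpa [hq] using h1
  have hstr' : ∀ l ∈ K.dropWhile q, PySem.Str.strip l = l := by
    intro l hl
    exact hstr l ((List.dropWhile_sublist (l := K) (p := q)).subset hl)
  have hscan : pvScanK false false K = pvScanK false false (K.dropWhile q) := by
    conv_lhs => rw [hKdec]
    exact pv_scanK_conts_false (K.takeWhile q) false _ hpre
  rw [hscan]
  have hA : ((PySem.Str.splitlines e).foldl pvStepA (PySem.Dict.empty, none)) =
      (K.dropWhile q).foldl pvCoreA (PySem.Dict.empty, none) := by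
    rw [pv_foldA_filter, ← hK]
    conv_lhs => rw [hKdec]
    rw [List.foldl_append, pv_preA _ _ hpre]
  rw [hA]
  have hB : (K.foldl pvStepBlk []).foldl pvInsBlk PySem.Dict.empty =
      pvBlocksGo (K.dropWhile q) PySem.Dict.empty := by
    conv_lhs => rw [hKdec]
    rw [List.foldl_append, pv_preB _ hpre,
      pv_mainB (K.dropWhile q).length _ le_rfl hhead [], List.nil_append,
      pv_insBlocks (K.dropWhile q).length _ le_rfl]
  rw [hB]
  exact pv_mainAB (K.dropWhile q).length _ le_rfl hstr' hhead false
    PySem.Dict.empty PySem.Dict.empty none rfl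

-- ===== VERDICT (by name: the statement is the Claim_ definition above) =====
theorem parse_ebnf_spec : Claim_unchanged_parse_ebnf := by
  intro e _hdom
  unfold Spec_parse_ebnf
  intro hnd
  have htop := pv_top e
  have hD : pvDScanC false false (((PySem.Chars.splitlines e.toList).map PySem.Chars.strip).filter
      (fun s => s.head?.any (fun c => c ≠ '#'))) = false := by
    cases hc : pvDScanC false false (((PySem.Chars.splitlines e.toList).map PySem.Chars.strip).filter
        (fun s => s.head?.any (fun c => c ≠ '#'))) with
    | false => rfl
    | true => exact absurd (by unfold D_parse_ebnf; exact hc) hnd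
  rw [hD] at htop
  unfold parse_ebnf parse_ebnf_alt
  dsimp only
  exact congrArg PySem.Dict.items (htop : _ = _)

theorem parse_ebnf_changed : Claim_changed_parse_ebnf := by
  unfold Claim_changed_parse_ebnf; decide

theorem parse_ebnf_tight : Claim_exact_parse_ebnf := by
  intro e _hdom hD
  have htop := pv_top e
  unfold D_parse_ebnf at hD
  rw [hD] at htop
  unfold parse_ebnf parse_ebnf_alt
  dsimp only
  exact pv_rel_items_ne _ _ htop
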